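-- pv_equiv track=rewrite | github.com/huangyingw/submissions | 1183/1183.maximum-number-of-ones.262983561.Accepted.leetcode.py | maximumNumberOfOnes
-- ===== SOURCE A (Python) =====
-- def maximumNumberOfOnes(width, height, sideLength, maxOnes):
--     whole_width, remainder_width = divmod(width, sideLength)
--     whole_height, remainder_height = divmod(height, sideLength)
--     matrix = []
--     for r in range(sideLength):
--         for c in range(sideLength):
--             repeats = (whole_width + int(r < remainder_width)) * (whole_height + int(c < remainder_height))
--             matrix.append(repeats)
--     return sum(sorted(matrix, reverse=True)[:maxOnes])
-- ===== SOURCE B (Python) =====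
-- def maximumNumberOfOnes(width, height, sideLength, maxOnes):
--     whole_width, remainder_width = divmod(width, sideLength)
--     whole_height, remainder_height = divmod(height, sideLength)
--     buckets = [
--         ((whole_width + 1) * (whole_height + 1), remainder_width * remainder_height),
--         ((whole_width + 1) * whole_height, remainder_width * (sideLength - remainder_height)),
--         (whole_width * (whole_height + 1), (sideLength - remainder_width) * remainder_height),
--         (whole_width * whole_height, (sideLength - remainder_width) * (sideLength - remainder_height)),
--     ]
--     total = 0
--     remaining = maxOnes
--     for value, count in sorted(buckets, key=lambda p: p[0], reverse=True):
--         take = min(remaining, count)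
--         total += value * take
--         remaining -= take
--     return total
-- ===== Notes on version B (the rewrite author's own statement) =====
-- stated objective: faster
-- what changed: Instead of materialising all sideLength^2 per-cell repeat counts, sorting them and summing a slice, B groups the cells into the 4 possible repeat values with closed-form multiplicities and greedily takes from the (at most 4) buckets in descending value order; Pre_ restricts to the natural domain of positive sideLength and nonnegative maxOnes (A raises ZeroDivisionError at sideLength=0; for negative sideLength A returns an empty-grid 0 and for negative maxOnes A's value is a Python slice-wraparound artefact, both outside the natural domain of grid counts).
-- outside the precondition, e.g. on maximumNumberOfOnes(3, 3, -2, 3): A returns 0, B returns 8; on maximumNumberOfOnes(3, 3, 2, -1): A returns 8, B returns -4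
import Mathlib
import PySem

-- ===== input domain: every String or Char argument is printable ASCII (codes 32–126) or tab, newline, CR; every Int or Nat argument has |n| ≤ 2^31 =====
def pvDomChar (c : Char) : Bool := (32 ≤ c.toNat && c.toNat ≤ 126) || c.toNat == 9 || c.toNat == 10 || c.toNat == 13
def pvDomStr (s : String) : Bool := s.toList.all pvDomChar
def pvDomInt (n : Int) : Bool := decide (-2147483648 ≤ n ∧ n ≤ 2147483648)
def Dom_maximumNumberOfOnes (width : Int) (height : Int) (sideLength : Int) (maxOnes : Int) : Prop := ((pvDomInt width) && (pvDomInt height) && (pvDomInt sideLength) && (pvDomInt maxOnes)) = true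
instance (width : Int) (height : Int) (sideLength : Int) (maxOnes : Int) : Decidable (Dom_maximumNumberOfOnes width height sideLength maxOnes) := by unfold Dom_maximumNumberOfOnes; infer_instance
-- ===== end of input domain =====

-- B replaces A's build-s²-cells-then-sort-then-slice with 4 closed-form value buckets taken greedily (asymptotically faster).

-- ===== PORT A =====
def maximumNumberOfOnes (width : Int) (height : Int) (sideLength : Int) (maxOnes : Int) : Int :=
  match PySem.Int.divmod? width sideLength, PySem.Int.divmod? height sideLength with
  | some (wholeWidth, remainderWidth), some (wholeHeight, remainderHeight) =>
    let matrix : List Int :=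
      (PySem.List.pyRange 0 sideLength 1).foldl (fun acc r =>
        (PySem.List.pyRange 0 sideLength 1).foldl (fun acc c =>
          acc ++ [(wholeWidth + (if r < remainderWidth then 1 else 0)) *
                  (wholeHeight + (if c < remainderHeight then 1 else 0))]) acc) []
    -- sorted(matrix, reverse=True): Python's sorted is a stable sort; ported by hand as Lean's
    -- stable mergeSort with the descending comparator (exact: a stable descending sort of an Int
    -- list is uniquely determined; PySem's insertion sort is the same function but overflows the
    -- evaluator's stack on large matrices)
    (PySem.List.slice (matrix.mergeSort (fun a b => decide (b ≤ a))) none (some maxOnes)).sum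
  | _, _ => 0  -- unreachable under Pre_ (divmod? = none ↔ sideLength = 0, where Python raises)

-- ===== PORT B =====
def maximumNumberOfOnes_alt (width : Int) (height : Int) (sideLength : Int) (maxOnes : Int) : Int :=
  match PySem.Int.divmod? width sideLength with
  | none => 0  -- unreachable under Pre_ (divmod? = none ↔ sideLength = 0, where Python raises)
  | some (wholeWidth, remainderWidth) =>
    match PySem.Int.divmod? height sideLength with
    | none => 0  -- unreachable under Pre_
    | some (wholeHeight, remainderHeight) =>
    let buckets : List (Int × Int) :=
      [((wholeWidth + 1) * (wholeHeight + 1), remainderWidth * remainderHeight),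
       ((wholeWidth + 1) * wholeHeight, remainderWidth * (sideLength - remainderHeight)),
       (wholeWidth * (wholeHeight + 1), (sideLength - remainderWidth) * remainderHeight),
       (wholeWidth * wholeHeight, (sideLength - remainderWidth) * (sideLength - remainderHeight))]
    ((PySem.List.sorted buckets (fun p => p.1) true).foldl
      (fun (st : Int × Int) p =>
        let take := min st.2 p.2
        (st.1 + p.1 * take, st.2 - take)) (0, maxOnes)).1

-- ===== PRECONDITION & SPEC =====
-- Pre_ excludes sideLength ≤ 0 (A raises ZeroDivisionError at 0; for negative sideLength A returns
-- an empty-grid 0) and negative maxOnes (A's value there is a Python slice-wraparound artefact):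
-- both lie outside the natural domain of grid side lengths and ones counts.
def Pre_maximumNumberOfOnes (width : Int) (height : Int) (sideLength : Int) (maxOnes : Int) : Prop :=
  0 < sideLength ∧ 0 ≤ maxOnes
instance (width : Int) (height : Int) (sideLength : Int) (maxOnes : Int) : Decidable (Pre_maximumNumberOfOnes width height sideLength maxOnes) := by unfold Pre_maximumNumberOfOnes; infer_instance

def pvWitness_maximumNumberOfOnes : Int × Int × Int × Int := (3, 4, 2, 3)

def Spec_maximumNumberOfOnes (width : Int) (height : Int) (sideLength : Int) (maxOnes : Int) (out : Int) : Prop := out = maximumNumberOfOnes_alt width height sideLength maxOnes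
instance (width : Int) (height : Int) (sideLength : Int) (maxOnes : Int) (out : Int) : Decidable (Spec_maximumNumberOfOnes width height sideLength maxOnes out) := by unfold Spec_maximumNumberOfOnes; infer_instance

-- ===== CLAIM (what is proved, stated in full; the proofs are below) =====
def Claim_equal_maximumNumberOfOnes : Prop := ∀ (width : Int) (height : Int) (sideLength : Int) (maxOnes : Int), Dom_maximumNumberOfOnes width height sideLength maxOnes → Pre_maximumNumberOfOnes width height sideLength maxOnes → Spec_maximumNumberOfOnes width height sideLength maxOnes (maximumNumberOfOnes width height sideLength maxOnes)

-- ===== LEMMAS AND PROOFS =====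

-- expansion of a bucket list into the run of its values
def pvBlocks (l : List (Int × Int)) : List Int := l.flatMap (fun p => List.replicate p.2.toNat p.1)

theorem pvBlocks_cons (p : Int × Int) (l : List (Int × Int)) :
    pvBlocks (p :: l) = List.replicate p.2.toNat p.1 ++ pvBlocks l := by
  simp [pvBlocks]

-- a constant-valued flatMap is one replicate block
theorem pvPairwise_replicate_ge (n : Nat) (x : Int) :
    (List.replicate n x).Pairwise (fun a b : Int => b ≤ a) := by
  induction n with
  | zero => simp
  | succ n ih =>
    simp only [List.replicate_succ, List.pairwise_cons]
    exact ⟨fun y hy => le_of_eq (List.eq_of_mem_replicate hy), ih⟩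

theorem pvMem_pvBlocks {x : Int} {l : List (Int × Int)} (h : x ∈ pvBlocks l) :
    ∃ p ∈ l, x = p.1 := by
  rcases List.mem_flatMap.mp h with ⟨p, hp, hx⟩
  exact ⟨p, hp, List.eq_of_mem_replicate hx⟩

theorem pvPairwise_pvBlocks (l : List (Int × Int))
    (h : l.Pairwise (fun p q => q.1 ≤ p.1)) :
    (pvBlocks l).Pairwise (fun a b : Int => b ≤ a) := by
  induction l with
  | nil => simp [pvBlocks]
  | cons p t ih =>
    rw [pvBlocks_cons]
    rcases List.pairwise_cons.mp h with ⟨hpq, ht⟩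
    refine List.pairwise_append.mpr ⟨pvPairwise_replicate_ge _ _, ih ht, ?_⟩
    intro a ha b hb
    rcases pvMem_pvBlocks hb with ⟨q, hq, rfl⟩
    have := List.eq_of_mem_replicate ha
    subst this
    exact hpq q hq

-- the greedy bucket fold computes the sum of the first k elements of the block expansion
theorem pvGreedy (l : List (Int × Int)) (hpos : ∀ p ∈ l, 0 ≤ p.2) :
    ∀ (k acc : Int), 0 ≤ k →
      (l.foldl (fun (st : Int × Int) p =>
        (st.1 + p.1 * (min st.2 p.2), st.2 - min st.2 p.2)) (acc, k)).1
      = acc + ((pvBlocks l).take k.toNat).sum := by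
  induction l with
  | nil => intro k acc hk; simp [pvBlocks]
  | cons p t ih =>
    intro k acc hk
    have hp : 0 ≤ p.2 := hpos p (by simp)
    have ht : ∀ q ∈ t, 0 ≤ q.2 := fun q hq => hpos q (by simp [hq])
    have hk' : 0 ≤ k - min k p.2 := by omega
    rw [List.foldl_cons, pvBlocks_cons]
    rw [ih ht (k - min k p.2) (acc + p.1 * min k p.2) hk']
    rw [List.take_append, List.take_replicate, List.sum_append,
        List.sum_replicate]
    have h1 : (min k.toNat p.2.toNat) • p.1 = p.1 * min k p.2 := by
      rw [nsmul_eq_mul]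
      have : ((min k.toNat p.2.toNat : Nat) : Int) = min k p.2 := by omega
      rw [this]; ring
    have h2 : (k - min k p.2).toNat = k.toNat - (List.replicate p.2.toNat p.1).length := by
      simp only [List.length_replicate]; omega
    rw [h1, h2]; ring

-- the whole A-side pipeline, stated over the divmod outputs
theorem pvFlatMap_congr {α β : Type} (l : List α) (f g : α → List β) (h : ∀ x ∈ l, f x = g x) :
    l.flatMap f = l.flatMap g := by
  induction l with
  | nil => rfl
  | cons a t ih => simp [h a (by simp), ih (fun x hx => h x (by simp [hx]))]

theorem pvFlatMap_const_replicate {α : Type} (l : List α) (m : Nat) (x : Int) :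
    l.flatMap (fun _ => List.replicate m x) = List.replicate (l.length * m) x := by
  induction l with
  | nil => simp
  | cons a t ih =>
    simp only [List.flatMap_cons, ih, List.length_cons]
    rw [← List.replicate_add]
    congr 1
    ring

theorem pvMap_split (sL t a b : Int) (h0 : 0 ≤ t) (h1 : t ≤ sL) :
    (PySem.List.pyRange 0 sL 1).map (fun c => if c < t then a else b)
    = List.replicate t.toNat a ++ List.replicate (sL - t).toNat b := by
  rw [PySem.List.pyRange_one_append 0 t sL h0 h1, List.map_append]
  congr 1
  · rw [List.map_congr_left (g := fun _ => a)
      (fun c hc => if_pos ((PySem.List.mem_pyRange_one).mp hc).2)]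
    rw [List.map_const', PySem.List.length_pyRange_one]
    norm_num
  · rw [List.map_congr_left (g := fun _ => b)
      (fun c hc => if_neg (by have := (PySem.List.mem_pyRange_one).mp hc; omega))]
    rw [List.map_const', PySem.List.length_pyRange_one]

theorem pvCentralPerm (sL ww rw wh rh : Int)
    (hrw0 : 0 ≤ rw) (hrw1 : rw ≤ sL) (hrh0 : 0 ≤ rh) (hrh1 : rh ≤ sL) :
    List.Perm
      ((PySem.List.pyRange 0 sL 1).foldl (fun acc r =>
        (PySem.List.pyRange 0 sL 1).foldl (fun acc c =>
          acc ++ [(ww + (if r < rw then 1 else 0)) * (wh + (if c < rh then 1 else 0))]) acc) [])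
      (pvBlocks [((ww + 1) * (wh + 1), rw * rh),
         ((ww + 1) * wh, rw * (sL - rh)),
         (ww * (wh + 1), (sL - rw) * rh),
         (ww * wh, (sL - rw) * (sL - rh))]) := by
  have hmat1 : ((PySem.List.pyRange 0 sL 1).foldl (fun acc r =>
        (PySem.List.pyRange 0 sL 1).foldl (fun acc c =>
          acc ++ [(ww + (if r < rw then 1 else 0)) * (wh + (if c < rh then 1 else 0))]) acc) [])
      = (PySem.List.pyRange 0 sL 1).flatMap (fun r =>
          List.replicate rh.toNat ((ww + (if r < rw then 1 else 0)) * (wh + 1))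
          ++ List.replicate (sL - rh).toNat ((ww + (if r < rw then 1 else 0)) * wh)) := by
    rw [PySem.List.foldl_congr_mem _ _
      (fun acc r => acc ++ (List.replicate rh.toNat ((ww + (if r < rw then 1 else 0)) * (wh + 1))
          ++ List.replicate (sL - rh).toNat ((ww + (if r < rw then 1 else 0)) * wh))) _
      (fun acc r _ => by
        beta_reduce
        rw [PySem.List.foldl_append_singleton_eq_map]
        congr 1
        rw [List.map_congr_left
          (g := fun c => if c < rh then ((ww + (if r < rw then 1 else 0)) * (wh + 1))
            else ((ww + (if r < rw then 1 else 0)) * wh))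
          (fun c _ => by by_cases hc : c < rh <;> simp [hc])]
        exact pvMap_split sL rh _ _ hrh0 hrh1)]
    rw [PySem.List.foldl_append_eq_flatMap, List.nil_append]
  rw [hmat1]
  -- split the per-row pair of blocks into two flatMaps
  refine List.Perm.trans (List.flatMap_append_perm _ _ _).symm ?_
  have hsplit : PySem.List.pyRange 0 sL 1
      = PySem.List.pyRange 0 rw 1 ++ PySem.List.pyRange rw sL 1 :=
    PySem.List.pyRange_one_append 0 rw sL hrw0 hrw1
  have hcol : ∀ (n : Nat) (v1 v0 : Int),
      (PySem.List.pyRange 0 sL 1).flatMap (fun r =>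
        List.replicate n ((ww + (if r < rw then 1 else 0)) * v1))
      = List.replicate (rw.toNat * n) ((ww + 1) * v1)
        ++ List.replicate ((sL - rw).toNat * n) (ww * v1) := by
    intro n v1 _
    rw [hsplit, List.flatMap_append]
    congr 1
    · rw [pvFlatMap_congr _ _ (fun _ => List.replicate n ((ww + 1) * v1))
        (fun r hr => by
          have := (PySem.List.mem_pyRange_one).mp hr
          rw [if_pos this.2])]
      rw [pvFlatMap_const_replicate, PySem.List.length_pyRange_one]
      norm_num
    · rw [pvFlatMap_congr _ _ (fun _ => List.replicate n (ww * v1))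
        (fun r hr => by
          have := (PySem.List.mem_pyRange_one).mp hr
          rw [if_neg (by omega)]
          ring_nf)]
      rw [pvFlatMap_const_replicate, PySem.List.length_pyRange_one]
  rw [hcol rh.toNat (wh + 1) 0, hcol (sL - rh).toNat wh 0]
  -- counts as toNat products
  have c11 : (rw * rh).toNat = rw.toNat * rh.toNat := by
    have h : rw * rh = ((rw.toNat * rh.toNat : Nat) : Int) := by
      push_cast; rw [Int.toNat_of_nonneg hrw0, Int.toNat_of_nonneg hrh0]
    rw [h, Int.toNat_natCast]
  have c10 : (rw * (sL - rh)).toNat = rw.toNat * (sL - rh).toNat := by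
    have h : rw * (sL - rh) = ((rw.toNat * (sL - rh).toNat : Nat) : Int) := by
      push_cast; rw [Int.toNat_of_nonneg hrw0, Int.toNat_of_nonneg (by omega : (0:Int) ≤ sL - rh)]
    rw [h, Int.toNat_natCast]
  have c01 : ((sL - rw) * rh).toNat = (sL - rw).toNat * rh.toNat := by
    have h : (sL - rw) * rh = (((sL - rw).toNat * rh.toNat : Nat) : Int) := by
      push_cast; rw [Int.toNat_of_nonneg (by omega : (0:Int) ≤ sL - rw), Int.toNat_of_nonneg hrh0]
    rw [h, Int.toNat_natCast]
  have c00 : ((sL - rw) * (sL - rh)).toNat = (sL - rw).toNat * (sL - rh).toNat := by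
    have h : (sL - rw) * (sL - rh) = (((sL - rw).toNat * (sL - rh).toNat : Nat) : Int) := by
      push_cast
      rw [Int.toNat_of_nonneg (by omega : (0:Int) ≤ sL - rw),
        Int.toNat_of_nonneg (by omega : (0:Int) ≤ sL - rh)]
    rw [h, Int.toNat_natCast]
  simp only [pvBlocks, List.flatMap_cons, List.flatMap_nil, List.append_nil, c11, c10, c01, c00]
  -- block shuffle: [A ++ B] ++ [C ++ D] ~ A ++ C ++ B ++ D (values v11, v01, v10, v00 on the left)
  rw [List.append_assoc]
  exact List.Perm.append_left _ (List.perm_append_comm_assoc _ _ _)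

theorem pvCentral (sL mO ww rw wh rh : Int) (hm : 0 ≤ mO)
    (hrw0 : 0 ≤ rw) (hrw1 : rw ≤ sL) (hrh0 : 0 ≤ rh) (hrh1 : rh ≤ sL) :
    (PySem.List.slice
      (((PySem.List.pyRange 0 sL 1).foldl (fun acc r =>
          (PySem.List.pyRange 0 sL 1).foldl (fun acc c =>
            acc ++ [(ww + (if r < rw then 1 else 0)) * (wh + (if c < rh then 1 else 0))]) acc) []).mergeSort
        (fun a b => decide (b ≤ a)))
      none (some mO)).sum
    = ((PySem.List.sorted
        [((ww + 1) * (wh + 1), rw * rh),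
         ((ww + 1) * wh, rw * (sL - rh)),
         (ww * (wh + 1), (sL - rw) * rh),
         (ww * wh, (sL - rw) * (sL - rh))] (fun p => p.1) true).foldl
        (fun (st : Int × Int) p =>
          (st.1 + p.1 * (min st.2 p.2), st.2 - min st.2 p.2)) (0, mO)).1 := by
  have hperm := pvCentralPerm sL ww rw wh rh hrw0 hrw1 hrh0 hrh1
  have hsbperm : List.Perm
      (pvBlocks [((ww + 1) * (wh + 1), rw * rh),
         ((ww + 1) * wh, rw * (sL - rh)),
         (ww * (wh + 1), (sL - rw) * rh),
         (ww * wh, (sL - rw) * (sL - rh))])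
      (pvBlocks (PySem.List.sorted [((ww + 1) * (wh + 1), rw * rh),
         ((ww + 1) * wh, rw * (sL - rh)),
         (ww * (wh + 1), (sL - rw) * rh),
         (ww * wh, (sL - rw) * (sL - rh))] (fun p => p.1) true)) :=
    (List.Perm.symm (PySem.List.sorted_perm _ _ _)).flatMap_right _
  have hpw := pvPairwise_pvBlocks _ (PySem.List.sorted_pairwise_rev
    ([((ww + 1) * (wh + 1), rw * rh),
      ((ww + 1) * wh, rw * (sL - rh)),
      (ww * (wh + 1), (sL - rw) * rh),
      (ww * wh, (sL - rw) * (sL - rh))]) (fun p => p.1))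
  have pw1 : (((PySem.List.pyRange 0 sL 1).foldl (fun acc r =>
          (PySem.List.pyRange 0 sL 1).foldl (fun acc c =>
            acc ++ [(ww + (if r < rw then 1 else 0)) * (wh + (if c < rh then 1 else 0))]) acc) []).mergeSort
        (fun a b => decide (b ≤ a))).Pairwise (fun a b : Int => b ≤ a) :=
    (List.pairwise_mergeSort (by intro a b c h1 h2; simp at *; omega)
      (by intro a b; simp; omega) _).imp (by intro a b h; simpa using h)
  have hsorted_eq : (((PySem.List.pyRange 0 sL 1).foldl (fun acc r =>
          (PySem.List.pyRange 0 sL 1).foldl (fun acc c =>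
            acc ++ [(ww + (if r < rw then 1 else 0)) * (wh + (if c < rh then 1 else 0))]) acc) []).mergeSort
        (fun a b => decide (b ≤ a)))
      = pvBlocks (PySem.List.sorted [((ww + 1) * (wh + 1), rw * rh),
         ((ww + 1) * wh, rw * (sL - rh)),
         (ww * (wh + 1), (sL - rw) * rh),
         (ww * wh, (sL - rw) * (sL - rh))] (fun p => p.1) true) :=
    List.Perm.eq_of_pairwise (fun a b _ _ h1 h2 => le_antisymm h2 h1)
      pw1
      hpw
      ((List.mergeSort_perm _ _).trans (hperm.trans hsbperm))
  rw [hsorted_eq, PySem.List.slice_to _ hm]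
  have hpos : ∀ p ∈ PySem.List.sorted [((ww + 1) * (wh + 1), rw * rh),
         ((ww + 1) * wh, rw * (sL - rh)),
         (ww * (wh + 1), (sL - rw) * rh),
         (ww * wh, (sL - rw) * (sL - rh))] (fun p => p.1) true, 0 ≤ p.2 := by
    intro p hp
    rw [PySem.List.mem_sorted] at hp
    simp only [List.mem_cons, List.not_mem_nil, or_false] at hp
    rcases hp with rfl | rfl | rfl | rfl <;>
      exact mul_nonneg (by omega) (by omega)
  rw [pvGreedy _ hpos mO 0 hm]
  simp

-- ===== VERDICT (by name: the statement is the Claim_ definition above) =====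
theorem maximumNumberOfOnes_spec : Claim_equal_maximumNumberOfOnes := by
  intro width height sideLength maxOnes _ hpre
  rcases hpre with ⟨hs, hm⟩
  unfold Spec_maximumNumberOfOnes maximumNumberOfOnes maximumNumberOfOnes_alt
  have hdw : PySem.Int.divmod? width sideLength
      = some (PySem.Int.floordiv width sideLength, PySem.Int.mod width sideLength) := by
    simp [PySem.Int.divmod?, PySem.Int.floordiv, PySem.Int.mod]
    omega
  have hdh : PySem.Int.divmod? height sideLength
      = some (PySem.Int.floordiv height sideLength, PySem.Int.mod height sideLength) := by
    simp [PySem.Int.divmod?, PySem.Int.floordiv, PySem.Int.mod]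
    omega
  rw [hdw, hdh]
  have hmw : PySem.Int.mod width sideLength = width % sideLength :=
    PySem.Int.mod_eq_emod_of_pos hs
  have hmh : PySem.Int.mod height sideLength = height % sideLength :=
    PySem.Int.mod_eq_emod_of_pos hs
  have h1 : 0 ≤ PySem.Int.mod width sideLength := by
    rw [hmw]; exact Int.emod_nonneg _ (by omega)
  have h2 : PySem.Int.mod width sideLength ≤ sideLength := by
    rw [hmw]; exact le_of_lt (Int.emod_lt_of_pos _ hs)
  have h3 : 0 ≤ PySem.Int.mod height sideLength := by
    rw [hmh]; exact Int.emod_nonneg _ (by omega)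
  have h4 : PySem.Int.mod height sideLength ≤ sideLength := by
    rw [hmh]; exact le_of_lt (Int.emod_lt_of_pos _ hs)
  exact pvCentral sideLength maxOnes _ _ _ _ hm h1 h2 h3 h4
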